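-- pv_equiv track=rewrite | github.com/dudecon/python | PeripheralArborPageGen.py | description
-- ===== SOURCE A (Python) =====
-- def description(instr):
--     outstr = instr.strip("0123456789_")
--     uppercount = 0
--     space_inserts = []
--     for ch in enumerate(outstr):
--         if ch[1].isupper():
--             uppercount += 1
--         else:
--             uppercount = 0
--         if ch[0] == 0: continue
--         if uppercount == 1: space_inserts.append(ch[0])
--     space_inserts.sort(reverse=True)
--     for i in space_inserts:
--         outstr = outstr[:i] + ' ' + outstr[i:]
--     outstr = outstr.replace("_","")
--     return outstr
-- ===== SOURCE B (Python) =====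
-- def description(instr):
--     outstr = instr.strip("0123456789_")
--     words = []
--     word = []
--     prev_upper = False
--     for i, ch in enumerate(outstr):
--         if ch.isupper() and not prev_upper and i > 0:
--             words.append(''.join(word))
--             word = []
--         if ch != '_':
--             word.append(ch)
--         prev_upper = ch.isupper()
--     words.append(''.join(word))
--     return ' '.join(words)
-- ===== Notes on version B (the rewrite author's own statement) =====
-- stated objective: simpler
-- what changed: B builds the result in a single pass with a current-word buffer and a words list flushed at each uppercase run-start, replacing A's collect-insert-positions, reverse-sort, repeated slice-splicing and global underscore replace.
import Mathlib
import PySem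

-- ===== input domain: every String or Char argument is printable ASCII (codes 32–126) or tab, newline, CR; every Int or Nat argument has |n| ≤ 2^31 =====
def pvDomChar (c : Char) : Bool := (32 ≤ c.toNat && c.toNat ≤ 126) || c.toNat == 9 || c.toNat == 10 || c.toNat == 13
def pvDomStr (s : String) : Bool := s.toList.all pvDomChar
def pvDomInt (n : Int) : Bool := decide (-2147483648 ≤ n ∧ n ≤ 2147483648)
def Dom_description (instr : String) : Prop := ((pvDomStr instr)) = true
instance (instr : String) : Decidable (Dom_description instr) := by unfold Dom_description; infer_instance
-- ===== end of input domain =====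

-- B rebuilds the result in ONE pass with word buffers (flush a word at each uppercase run-start)
-- instead of A's collect-insert-positions / sort / repeated slice-splicing / global replace: simpler.

-- ===== PORT A =====
def descStepA (st : Int × List Int) (ch : Int × Char) : Int × List Int :=
  let u := if PySem.Chars.isupper ch.2 then st.1 + 1 else 0
  if ch.1 == 0 then (u, st.2)
  else if u == 1 then (u, st.2 ++ [ch.1]) else (u, st.2)

def description (instr : String) : String :=
  let outstr := PySem.Chars.stripChars instr.toList ("0123456789_".toList)
  let fold := (PySem.List.enumerate outstr).foldl descStepA (0, [])
  let space_inserts := PySem.List.sorted fold.2 id true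
  let outstr2 := space_inserts.foldl
    (fun s i => PySem.List.slice s none (some i) ++ [' '] ++ PySem.List.slice s (some i) none) outstr
  String.mk (PySem.Chars.replace outstr2 ("_".toList) [])

-- ===== PORT B =====
def descStepB (st : List (List Char) × List Char × Bool) (p : Int × Char) :
    List (List Char) × List Char × Bool :=
  let flush := PySem.Chars.isupper p.2 && !st.2.2 && decide (0 < p.1)
  let ws := if flush then st.1 ++ [st.2.1] else st.1
  let w := if flush then ([] : List Char) else st.2.1
  let w := if p.2 ≠ '_' then w ++ [p.2] else w
  (ws, w, PySem.Chars.isupper p.2)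

def description_alt (instr : String) : String :=
  let outstr := PySem.Chars.stripChars instr.toList ("0123456789_".toList)
  let st := (PySem.List.enumerate outstr).foldl descStepB ([], [], false)
  String.mk (PySem.Chars.join [' '] (st.1 ++ [st.2.1]))

-- ===== PRECONDITION & SPEC =====
def Spec_description (instr : String) (out : String) : Prop := out = description_alt instr
instance (instr : String) (out : String) : Decidable (Spec_description instr out) := by
  unfold Spec_description; infer_instance

-- ===== CLAIM (what is proved, stated in full; the proofs are below) =====
def Claim_equal_description : Prop := ∀ (instr : String), Dom_description instr → Spec_description instr (description instr)

-- ===== LEMMAS AND PROOFS =====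

/-- The space-insert positions A collects: index i (counting from `i`) of each
uppercase char whose predecessor is not uppercase. -/
def insertsSpec (prev : Char) (i : Int) : List Char → List Int
  | [] => []
  | c :: r => (if PySem.Chars.isupper c && !PySem.Chars.isupper prev then [i] else [])
      ++ insertsSpec c (i + 1) r

/-- The tail of the spaced string (before underscore removal). -/
def spaced (prev : Char) : List Char → List Char
  | [] => []
  | c :: r => (if PySem.Chars.isupper c && !PySem.Chars.isupper prev then [' '] else [])
      ++ c :: spaced c r

/-- Common one-pass specification: spaces inserted and underscores dropped. -/
def fsp (prev : Char) : List Char → List Char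
  | [] => []
  | c :: r => (if PySem.Chars.isupper c && !PySem.Chars.isupper prev then [' '] else [])
      ++ (if c ≠ '_' then [c] else []) ++ fsp c r

def joinSt (st : List (List Char) × List Char × Bool) : List Char :=
  PySem.Chars.join [' '] (st.1 ++ [st.2.1])

lemma foldA_eq (r : List Char) : ∀ (prev : Char) (i u : Int) (acc : List Int),
    1 ≤ i → 0 ≤ u → (u = 0 ↔ PySem.Chars.isupper prev = false) →
    ((PySem.List.enumerate r i).foldl descStepA (u, acc)).2 = acc ++ insertsSpec prev i r := by
  induction r with
  | nil => intro prev i u acc _ _ _; simp [PySem.List.enumerate, insertsSpec]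
  | cons c r ih =>
    intro prev i u acc hi hu hiff
    rw [PySem.List.enumerate_cons]
    have hne : (i == 0) = false := by simp; omega
    simp only [List.foldl_cons]
    by_cases hc : PySem.Chars.isupper c = true
    · by_cases hp : u = 0
      · have hprev : PySem.Chars.isupper prev = false := hiff.mp hp
        have h1 : ((u + 1 : Int) == 1) = true := by simp; omega
        simp only [descStepA, hc, if_true, hne, if_false, h1, Bool.false_eq_true]
        rw [ih c (i+1) (u+1) (acc ++ [i]) (by omega) (by omega) (by simp [hc]; omega)]
        simp [insertsSpec, hc, hprev]
      · have hprev : PySem.Chars.isupper prev = true := by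
          cases h : PySem.Chars.isupper prev with
          | false => exact absurd (hiff.mpr h) hp
          | true => rfl
        have h1 : ((u + 1 : Int) == 1) = false := by simp; omega
        simp only [descStepA, hc, if_true, hne, if_false, h1, Bool.false_eq_true]
        rw [ih c (i+1) (u+1) acc (by omega) (by omega) (by simp [hc]; omega)]
        simp [insertsSpec, hc, hprev]
    · have hc' : PySem.Chars.isupper c = false := by simpa using hc
      have h1 : ((0 : Int) == 1) = false := by decide
      simp only [descStepA, hc', Bool.false_eq_true, if_false, hne, h1]
      rw [ih c (i+1) 0 acc (by omega) (by omega) (by simp [hc'])]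
      simp [insertsSpec, hc']

lemma insertsSpec_ge (r : List Char) : ∀ (prev : Char) (i : Int) (j : Int),
    j ∈ insertsSpec prev i r → i ≤ j := by
  induction r with
  | nil => intro prev i j h; simp [insertsSpec] at h
  | cons c r ih =>
    intro prev i j h
    simp only [insertsSpec, List.mem_append] at h
    rcases h with h | h
    · split at h <;> simp_all
    · have := ih c (i+1) j h; omega

lemma insertsSpec_pairwise (r : List Char) : ∀ (prev : Char) (i : Int),
    (insertsSpec prev i r).Pairwise (· < ·) := by
  induction r with
  | nil => intro prev i; simp [insertsSpec]
  | cons c r ih =>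
    intro prev i
    simp only [insertsSpec]
    rw [List.pairwise_append]
    refine ⟨by split <;> simp, ih c (i+1), ?_⟩
    intro a ha b hb
    have hb' := insertsSpec_ge r c (i+1) b hb
    split at ha <;> simp_all

lemma foldr_inserts (r : List Char) : ∀ (prev : Char) (xs : List Char),
    (insertsSpec prev (xs.length : Int) r).foldr
      (fun i s => PySem.List.slice s none (some i) ++ [' '] ++ PySem.List.slice s (some i) none)
      (xs ++ r) = xs ++ spaced prev r := by
  induction r with
  | nil => intro prev xs; simp [insertsSpec, spaced]
  | cons c r ih =>
    intro prev xs
    have hlen : ((xs.length : Int) + 1) = ((xs ++ [c]).length : Int) := by simp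
    have hih := ih c (xs ++ [c])
    rw [List.append_assoc] at hih
    simp only [List.singleton_append] at hih
    by_cases hm : (PySem.Chars.isupper c && !PySem.Chars.isupper prev) = true
    · simp only [insertsSpec, hm, if_true, List.singleton_append, List.foldr_cons, hlen]
      rw [hih]
      rw [PySem.List.slice_to _ (by positivity), PySem.List.slice_from _ (by positivity)]
      simp only [Int.toNat_natCast, List.append_assoc]
      rw [List.take_left, List.drop_left]
      simp [spaced, hm]
    · simp only [insertsSpec, hm, Bool.false_eq_true, if_false, List.nil_append, hlen]
      rw [hih]
      simp [spaced, hm]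

lemma replace_go_underscore (fuel : Nat) : ∀ (l acc : List Char), l.length ≤ fuel →
    PySem.Chars.replace.go ['_'] [] fuel l acc = acc.reverse ++ l.filter (· ≠ '_') := by
  induction fuel with
  | zero =>
    intro l acc h
    have : l = [] := by cases l <;> simp_all
    subst this; simp [PySem.Chars.replace.go]
  | succ n ih =>
    intro l acc h
    cases l with
    | nil => simp [PySem.Chars.replace.go]
    | cons c t =>
      by_cases hc : c = '_'
      · subst hc
        have hpre : ['_'].isPrefixOf ('_' :: t) = true := by simp [List.isPrefixOf]
        simp only [PySem.Chars.replace.go, hpre, if_true, List.length_cons, List.length_nil,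
          List.drop_succ_cons, List.drop_zero, List.reverse_nil, List.nil_append]
        rw [ih t acc (by simp at h; omega)]
        simp
      · have hpre : ['_'].isPrefixOf (c :: t) = false := by
          simp only [List.isPrefixOf]
          simp
          exact fun h' => hc h'.symm
        simp only [PySem.Chars.replace.go, hpre, Bool.false_eq_true, if_false]
        rw [ih t (c :: acc) (by simp at h; omega)]
        simp [hc]

lemma replace_underscore (s : List Char) :
    PySem.Chars.replace s ['_'] [] = s.filter (· ≠ '_') := by
  simp only [PySem.Chars.replace]
  rw [if_neg (by simp)]
  simpa using replace_go_underscore s.length s [] le_rfl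

lemma filter_spaced (r : List Char) : ∀ (prev : Char),
    (spaced prev r).filter (· ≠ '_') = fsp prev r := by
  induction r with
  | nil => intro prev; simp [spaced, fsp]
  | cons c r ih =>
    intro prev
    simp only [ne_eq, decide_not] at ih
    have hund : PySem.Chars.isupper '_' = false := by decide
    by_cases hm : (PySem.Chars.isupper c && !PySem.Chars.isupper prev) = true <;>
      by_cases hc : c = '_' <;>
        simp [spaced, fsp, hm, hc, hund, ih]

lemma join_merge (ws : List (List Char)) : ∀ (w v : List Char),
    PySem.Chars.join [' '] (ws ++ [w, v]) = PySem.Chars.join [' '] (ws ++ [w ++ ' ' :: v]) := by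
  induction ws with
  | nil =>
    intro w v
    simp [PySem.Chars.join_cons_cons, PySem.Chars.join_singleton]
  | cons a t ih =>
    intro w v
    cases t with
    | nil => simp [PySem.Chars.join_cons_cons, PySem.Chars.join_singleton]
    | cons b t' =>
      have h1 : (a :: b :: t') ++ [w, v] = a :: b :: (t' ++ [w, v]) := by simp
      have h2 : (a :: b :: t') ++ [w ++ ' ' :: v] = a :: b :: (t' ++ [w ++ ' ' :: v]) := by simp
      rw [h1, h2, PySem.Chars.join_cons_cons, PySem.Chars.join_cons_cons]
      have := ih w v
      simp only [List.cons_append] at this ⊢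
      rw [this]

lemma foldB_eq (r : List Char) : ∀ (prev : Char) (i : Int) (ws : List (List Char)) (w : List Char),
    1 ≤ i →
    joinSt ((PySem.List.enumerate r i).foldl descStepB (ws, w, PySem.Chars.isupper prev)) =
      PySem.Chars.join [' '] (ws ++ [w ++ fsp prev r]) := by
  induction r with
  | nil => intro prev i ws w _; simp [PySem.List.enumerate, joinSt, fsp]
  | cons c r ih =>
    intro prev i ws w hi
    rw [PySem.List.enumerate_cons]
    have hpos : decide (0 < i) = true := by simp; omega
    simp only [List.foldl_cons]
    by_cases hm : (PySem.Chars.isupper c && !PySem.Chars.isupper prev) = true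
    · have hstep : descStepB (ws, w, PySem.Chars.isupper prev) (i, c) =
          (ws ++ [w], if c ≠ '_' then [c] else [], PySem.Chars.isupper c) := by
        simp [descStepB, hm, hpos]
      rw [hstep, ih c (i+1) (ws ++ [w]) _ (by omega)]
      simp only [List.append_assoc, List.cons_append, List.nil_append]
      rw [join_merge]
      simp [fsp, hm]
    · have hstep : descStepB (ws, w, PySem.Chars.isupper prev) (i, c) =
          (ws, w ++ (if c ≠ '_' then [c] else []), PySem.Chars.isupper c) := by
        have hflush : (PySem.Chars.isupper c && !PySem.Chars.isupper prev && decide (0 < i)) = false := by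
          cases h1 : PySem.Chars.isupper c <;> cases h2 : PySem.Chars.isupper prev <;> simp_all
        simp only [descStepB, hflush, Bool.false_eq_true, if_false]
        split <;> simp
      rw [hstep, ih c (i+1) ws _ (by omega)]
      simp [fsp, hm]

lemma core_eq (cs : List Char) :
    (PySem.Chars.replace
      ((PySem.List.sorted ((PySem.List.enumerate cs).foldl descStepA (0, [])).2 id true).foldl
        (fun s i => PySem.List.slice s none (some i) ++ [' '] ++ PySem.List.slice s (some i) none) cs)
      ("_".toList) []) =
    PySem.Chars.join [' ']
      (((PySem.List.enumerate cs).foldl descStepB ([], [], false)).1 ++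
        [((PySem.List.enumerate cs).foldl descStepB ([], [], false)).2.1]) := by
  cases cs with
  | nil => rfl
  | cons c r =>
    -- A side
    have hA2 : ((PySem.List.enumerate (c :: r)).foldl descStepA (0, [])).2 = insertsSpec c 1 r := by
      rw [PySem.List.enumerate_cons, List.foldl_cons]
      have hstep : descStepA (0, []) (0, c) = ((if PySem.Chars.isupper c then 1 else 0 : Int), []) := by
        simp [descStepA]
      rw [hstep]
      simp only [zero_add]
      rw [foldA_eq r c 1 (if PySem.Chars.isupper c = true then (1:Int) else 0) [] le_rfl
        (by split <;> omega) (by split <;> simp_all)]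
      simp
    rw [hA2]
    have hsort : PySem.List.sorted (insertsSpec c 1 r) id true = (insertsSpec c 1 r).reverse := by
      apply PySem.List.sorted_rev_eq_of_perm_of_pairwise_gt
      · exact List.reverse_perm _
      · rw [List.pairwise_reverse]
        simpa using insertsSpec_pairwise r c 1
    rw [hsort, List.foldl_reverse]
    have hins := foldr_inserts r c [c]
    simp only [List.length_cons, List.length_nil, zero_add, Nat.cast_one, List.singleton_append] at hins
    rw [hins]
    rw [show ("_".toList : List Char) = ['_'] from rfl, replace_underscore]
    have hfil : (c :: spaced c r).filter (· ≠ '_') =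
        (if c ≠ '_' then [c] else []) ++ fsp c r := by
      rw [List.filter_cons]
      rw [filter_spaced r c]
      split <;> simp_all
    rw [hfil]
    -- B side
    rw [PySem.List.enumerate_cons, List.foldl_cons]
    have hstepB : descStepB ([], [], false) (0, c) =
        ([], if c ≠ '_' then [c] else [], PySem.Chars.isupper c) := by
      simp only [descStepB]
      norm_num
    rw [hstepB]
    have := foldB_eq r c 1 [] (if c ≠ '_' then [c] else []) le_rfl
    simp only [joinSt] at this
    simp only [zero_add]
    rw [this]
    simp [PySem.Chars.join_singleton]

-- ===== VERDICT (by name: the statement is the Claim_ definition above) =====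
theorem description_spec : Claim_equal_description := by
  intro instr _
  unfold Spec_description description description_alt
  simp only []
  have := core_eq (PySem.Chars.stripChars instr.toList ("0123456789_".toList))
  exact congrArg String.mk this
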